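-- pv_equiv track=rewrite | github.com/BryantLuu/company-interview-algorithms | getStride/piles.py | count_piles
-- ===== SOURCE A (Python) =====
-- def count_piles(boxes_count, max_carry_size, parts):
--    final_count = [0]
--    def reduce_piles(boxes_count, max_carry_size, parts):
--      max_parts = min(boxes_count, parts)
--      smallest_pile = int(boxes_count / parts) or 1
--      piles = [smallest_pile for x in range(0, max_parts)]
--      leftovers = boxes_count - sum(piles)
--      for index in range(0, leftovers):
--        piles[index] += 1
--      for pile in piles:
--          if pile <= max_carry_size:
--            final_count[0] += 1
--          else:
--            reduce_piles(pile, max_carry_size, parts)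
--    reduce_piles(boxes_count, max_carry_size, parts)
--    return final_count[0]
-- ===== SOURCE B (Python) =====
-- # B: level-by-level aggregation of (pile size -> multiplicity) instead of A's
-- # one-call-per-pile recursion; O(log b) levels with at most a few distinct sizes each.
-- def count_piles(boxes_count, max_carry_size, parts):
--     def split(b):
--         n = min(b, parts)
--         if n <= 0:
--             return []
--         q = b // parts or 1
--         r = b - q * n
--         out = []
--         if r > 0:
--             out.append((q + 1, r))
--         if n - r > 0:
--             out.append((q, n - r))
--         return out
--
--     total = 0
--     level = {}
--     for s, m in split(boxes_count):
--         level[s] = level.get(s, 0) + m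
--     while level:
--         nxt = {}
--         for s, m in level.items():
--             if s <= max_carry_size:
--                 total += m
--             else:
--                 for s2, m2 in split(s):
--                     nxt[s2] = nxt.get(s2, 0) + m * m2
--         level = nxt
--     return total
-- ===== Notes on version B (the rewrite author's own statement) =====
-- stated objective: faster
-- what changed: B replaces A's one-recursive-call-per-pile tree walk with an iterative level-by-level loop over (pile size -> multiplicity) dicts, so equal-sized piles are counted by multiplication instead of being visited one by one.
import Mathlib
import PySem

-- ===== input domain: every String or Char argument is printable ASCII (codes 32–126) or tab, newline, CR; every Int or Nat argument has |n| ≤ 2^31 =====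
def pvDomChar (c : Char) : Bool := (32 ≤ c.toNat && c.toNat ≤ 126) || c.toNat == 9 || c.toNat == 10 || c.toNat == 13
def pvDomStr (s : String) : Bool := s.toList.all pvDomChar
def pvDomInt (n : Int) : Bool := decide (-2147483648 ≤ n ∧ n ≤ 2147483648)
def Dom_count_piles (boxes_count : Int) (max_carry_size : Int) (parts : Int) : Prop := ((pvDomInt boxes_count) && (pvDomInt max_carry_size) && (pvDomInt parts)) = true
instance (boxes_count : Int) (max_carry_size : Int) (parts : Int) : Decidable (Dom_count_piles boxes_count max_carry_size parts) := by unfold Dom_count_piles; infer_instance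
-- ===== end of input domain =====

-- B aggregates equal-sized piles level by level as (size -> multiplicity) dicts instead of
-- A's one-recursive-call-per-pile walk; objective: faster (few dict entries per level vs one call per pile).

-- ===== PORT A =====
-- A's inner 'reduce_piles', with the mutated cell final_count[0] returned as the value and the
-- recursion made structural on a fuel argument; inside Pre_ the call depth is at most boxes_count,
-- so fuel boxes_count.toNat + 1 never runs out there (the 0-fuel branch is unreachable).
-- int(boxes_count / parts) is PySem.Int.truncdiv (exact: |args| ≤ 2^31 < 2^53);
-- 'piles[index] += 1' is List.set/getD — Python raises IndexError only outside Pre_ (parts < 0 < boxes_count).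
def reduceA (mcs p : Int) : Nat → Int → Int
  | 0, _ => 0
  | fuel+1, b =>
    let max_parts := min b p
    let smallest := if PySem.Int.truncdiv b p = 0 then 1 else PySem.Int.truncdiv b p
    let piles0 := (List.range max_parts.toNat).map (fun _ => smallest)
    let leftovers := b - piles0.sum
    let piles := (PySem.List.pyRange 0 leftovers).foldl
      (fun pl idx => pl.set idx.toNat (pl.getD idx.toNat 0 + 1)) piles0
    piles.foldl (fun acc pile => if pile ≤ mcs then acc + 1 else acc + reduceA mcs p fuel pile) 0

def count_piles (boxes_count : Int) (max_carry_size : Int) (parts : Int) : Int :=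
  reduceA max_carry_size parts (boxes_count.toNat + 1) boxes_count

-- ===== PORT B =====
-- Source B's split(b): the at-most-two (pile size, multiplicity) groups a box count splits into
def splitB (p b : Int) : List (Int × Int) :=
  let n := min b p
  if n ≤ 0 then []
  else
    let q0 := PySem.Int.floordiv b p
    let q := if q0 = 0 then 1 else q0
    let r := b - q * n
    let out : List (Int × Int) := []
    let out := if 0 < r then out ++ [(q + 1, r)] else out
    if 0 < n - r then out ++ [(q, n - r)] else out

-- one element of Source B's 'for s, m in level.items()' body, acting on the state (total, nxt)
def stepB (mcs p : Int) (st : Int × PySem.Dict Int Int) (sm : Int × Int) : Int × PySem.Dict Int Int :=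
  if sm.1 ≤ mcs then (st.1 + sm.2, st.2)
  else (st.1, (splitB p sm.1).foldl (fun d s2 => d.insert s2.1 (d.getD s2.1 0 + sm.2 * s2.2)) st.2)

-- Source B's 'while level:' loop; one fuel unit per iteration — levels' maximal size strictly
-- decreases, so inside Pre_ fuel boxes_count.toNat + 1 never runs out.
def loopB (mcs p : Int) : Nat → Int → PySem.Dict Int Int → Int
  | 0, total, _ => total
  | fuel+1, total, level =>
    if level.items.isEmpty then total
    else
      let st := level.items.foldl (stepB mcs p) (total, PySem.Dict.empty)
      loopB mcs p fuel st.1 st.2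

def count_piles_alt (boxes_count : Int) (max_carry_size : Int) (parts : Int) : Int :=
  let level := (splitB parts boxes_count).foldl
    (fun d sm => d.insert sm.1 (d.getD sm.1 0 + sm.2)) PySem.Dict.empty
  loopB max_carry_size parts (boxes_count.toNat + 1) 0 level

-- ===== PRECONDITION & SPEC =====
-- Exactly the inputs on which Python A returns: parts = 0 raises ZeroDivisionError;
-- boxes_count ≥ 1 with parts < 0 raises IndexError in the leftovers loop; boxes_count ≥ 1 with
-- parts = 1 ∧ boxes_count > max_carry_size, or with parts ≥ 2 ∧ max_carry_size ≤ 0, recurses forever.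
def Pre_count_piles (boxes_count : Int) (max_carry_size : Int) (parts : Int) : Prop :=
  (boxes_count ≤ 0 ∧ parts ≠ 0)
  ∨ (1 ≤ boxes_count ∧ parts = 1 ∧ boxes_count ≤ max_carry_size)
  ∨ (1 ≤ boxes_count ∧ 2 ≤ parts ∧ 1 ≤ max_carry_size)
instance (boxes_count : Int) (max_carry_size : Int) (parts : Int) : Decidable (Pre_count_piles boxes_count max_carry_size parts) := by unfold Pre_count_piles; infer_instance

def pvWitness_count_piles : Int × Int × Int := (7, 2, 3)

def Spec_count_piles (boxes_count : Int) (max_carry_size : Int) (parts : Int) (out : Int) : Prop := out = count_piles_alt boxes_count max_carry_size parts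
instance (boxes_count : Int) (max_carry_size : Int) (parts : Int) (out : Int) : Decidable (Spec_count_piles boxes_count max_carry_size parts out) := by unfold Spec_count_piles; infer_instance

-- ===== CLAIM (what is proved, stated in full; the proofs are below) =====
def Claim_equal_count_piles : Prop := ∀ (boxes_count : Int) (max_carry_size : Int) (parts : Int), Dom_count_piles boxes_count max_carry_size parts → Pre_count_piles boxes_count max_carry_size parts → Spec_count_piles boxes_count max_carry_size parts (count_piles boxes_count max_carry_size parts)

-- ===== LEMMAS AND PROOFS =====

-- reference count of a single pile of size s, truncated at recursion depth 'fuel'; both ports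
-- are shown equal to the same G-weighted sum at fuel boxes_count.toNat + 1
def G (mcs p : Int) : Nat → Int → Int
  | 0, _ => 0
  | f+1, s => if s ≤ mcs then 1 else ((splitB p s).map (fun sm => sm.2 * G mcs p f sm.1)).sum

lemma splitB_char (p b : Int) (hp : 1 ≤ p) (hb : 1 ≤ b) :
    ∃ q r : Int, 1 ≤ q ∧ 0 ≤ r ∧ r < min b p ∧ b = q * min b p + r ∧
      q = (if PySem.Int.truncdiv b p = 0 then 1 else PySem.Int.truncdiv b p) ∧
      splitB p b = (if 0 < r then [(q + 1, r)] else []) ++ [(q, min b p - r)] := by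
  have hfd : PySem.Int.floordiv b p = b / p := PySem.Int.floordiv_eq_ediv_of_pos (by omega)
  have htd : PySem.Int.truncdiv b p = b / p := Int.tdiv_eq_ediv_of_nonneg (by omega)
  rcases lt_or_ge b p with hlt | hge
  · -- b < p : q = 1, r = 0
    have hq0 : b / p = 0 := Int.ediv_eq_zero_of_lt (by omega) hlt
    have hmin : min b p = b := by omega
    refine ⟨1, 0, le_refl 1, le_refl 0, by omega, by rw [hmin]; omega, by rw [htd, hq0]; simp, ?_⟩
    rw [splitB]
    simp only [hfd, hq0, hmin]
    norm_num
    split_ifs <;> first | simp | omega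
  · -- p ≤ b : q = b / p ≥ 1, r = b % p
    have hq1 : 1 ≤ b / p := by
      rw [Int.le_ediv_iff_mul_le (by omega : (0:Int) < p)]; omega
    have hmin : min b p = p := by omega
    have hmod : b / p * p + b % p = b := by rw [mul_comm]; exact Int.mul_ediv_add_emod b p
    have hr0 : 0 ≤ b % p := Int.emod_nonneg b (by omega)
    have hrlt : b % p < p := Int.emod_lt_of_pos b (by omega)
    have hqif : (if b / p = 0 then 1 else b / p) = b / p := if_neg (by omega)
    refine ⟨b / p, b % p, hq1, hr0, by omega, by rw [hmin]; omega, by rw [htd, hqif], ?_⟩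
    rw [splitB]
    simp only [hfd, hmin, hqif]
    rw [if_neg (by omega)]
    have : b - b / p * p = b % p := by omega
    rw [this, if_pos (by omega)]
    simp

lemma foldl_set_incr (s : Int) (n : Nat) : ∀ r : Nat, r ≤ n →
    (PySem.List.pyRange 0 (r : Int)).foldl
      (fun pl idx => pl.set idx.toNat (pl.getD idx.toNat 0 + 1)) (List.replicate n s)
    = List.replicate r (s + 1) ++ List.replicate (n - r) s := by
  intro r
  induction r with
  | zero => intro _; simp [PySem.List.pyRange]
  | succ r ih =>
    intro hr
    have h0 : (0:Int) ≤ (r:Int) := by positivity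
    rw [show (((r+1 : Nat)) : Int) = (r : Int) + 1 by push_cast; ring,
        PySem.List.pyRange_one_succ_right h0, List.foldl_append, ih (by omega)]
    simp only [List.foldl_cons, List.foldl_nil]
    have hlen : (List.replicate r (s+1)).length = r := by simp
    have htn : (r : Int).toNat = r := by omega
    have hnr : n - r = (n - (r+1)) + 1 := by omega
    rw [htn, hnr, List.replicate_succ]
    rw [List.getD_eq_getElem?_getD, List.getElem?_append_right (by simp), List.set_append]
    simp only [hlen, lt_irrefl, if_false, Nat.sub_self, List.replicate_succ, List.set_cons_zero]
    rw [show ((s :: List.replicate (n - (r + 1)) s)[0]?.getD 0) = s from rfl]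
    rw [← List.singleton_append, ← List.append_assoc, ← List.replicate_succ', List.replicate_succ,
      List.cons_append]

lemma splitB_pos (p b : Int) (hp : 1 ≤ p) (hb : 1 ≤ b) :
    ∀ sm ∈ splitB p b, 1 ≤ sm.1 ∧ 1 ≤ sm.2 := by
  obtain ⟨q, r, hq, hr0, hrlt, _, _, hsplit⟩ := splitB_char p b hp hb
  intro sm hsm
  rw [hsplit] at hsm
  rcases List.mem_append.1 hsm with h | h
  · split_ifs at h with h1
    · simp at h; subst h; exact ⟨by simp; omega, by simp; omega⟩
    · simp at h
  · simp at h; subst h; exact ⟨by simp; omega, by simp; omega⟩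

lemma pilesA_eq_expand (p b : Int) (hp : 1 ≤ p) (hb : 1 ≤ b) :
    (let max_parts := min b p
     let smallest := if PySem.Int.truncdiv b p = 0 then 1 else PySem.Int.truncdiv b p
     let piles0 := (List.range max_parts.toNat).map (fun _ => smallest)
     let leftovers := b - piles0.sum
     (PySem.List.pyRange 0 leftovers).foldl
       (fun pl idx => pl.set idx.toNat (pl.getD idx.toNat 0 + 1)) piles0)
    = (splitB p b).flatMap (fun sm => List.replicate sm.2.toNat sm.1) := by
  obtain ⟨q, r, hq, hr0, hrlt, hsum, hqdef, hsplit⟩ := splitB_char p b hp hb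
  have hn1 : 1 ≤ min b p := by omega
  have hncast : ((min b p).toNat : Int) = min b p := by omega
  simp only
  rw [← hqdef]
  have hpiles0 : (List.range (min b p).toNat).map (fun _ => q) = List.replicate (min b p).toNat q := by
    simp [List.map_const']
  rw [hpiles0]
  have hsum0 : (List.replicate (min b p).toNat q).sum = min b p * q := by
    rw [List.sum_replicate, nsmul_eq_mul, hncast]
  rw [hsum0]
  have hleft : b - min b p * q = r := by rw [mul_comm]; omega
  rw [hleft]
  have hrcast : ((r.toNat : Nat) : Int) = r := by omega
  rw [← hrcast, foldl_set_incr q (min b p).toNat r.toNat (by omega)]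
  rw [hsplit]
  simp only [List.flatMap_append, List.flatMap_cons, List.flatMap_nil, List.append_nil]
  congr 1
  · split_ifs with h1
    · simp
    · have : r = 0 := by omega
      simp [this]
  · congr 1
    omega

lemma reduceA_succ (mcs p : Int) (hp : 1 ≤ p) (f : Nat) (b : Int) (hb : 1 ≤ b) :
    reduceA mcs p (f+1) b
    = ((splitB p b).map (fun sm => sm.2 * (if sm.1 ≤ mcs then 1 else reduceA mcs p f sm.1))).sum := by
  rw [reduceA]
  rw [pilesA_eq_expand p b hp hb]
  have hfn : (fun (acc pile : Int) => if pile ≤ mcs then acc + 1 else acc + reduceA mcs p f pile)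
      = (fun acc pile => acc + (if pile ≤ mcs then (1:Int) else reduceA mcs p f pile)) := by
    funext acc pile; split_ifs <;> ring
  rw [hfn, PySem.List.foldl_add, List.map_flatMap, List.flatMap_def, List.sum_flatten,
    List.map_map, zero_add]
  congr 1
  apply List.map_congr_left
  intro sm hsm
  obtain ⟨hs1, hm1⟩ := splitB_pos p b hp hb sm hsm
  simp only [Function.comp, List.map_replicate, List.sum_replicate, nsmul_eq_mul]
  rw [show ((sm.2.toNat : Nat) : Int) = sm.2 by omega]

lemma reduceA_eq_Gsum (mcs p : Int) (hp : 1 ≤ p) : ∀ (f : Nat) (b : Int), 1 ≤ b →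
    reduceA mcs p (f+1) b = ((splitB p b).map (fun sm => sm.2 * G mcs p (f+1) sm.1)).sum := by
  intro f
  induction f with
  | zero =>
    intro b hb
    rw [reduceA_succ mcs p hp 0 b hb]
    congr 1
    apply List.map_congr_left
    intro sm hsm
    by_cases h : sm.1 ≤ mcs
    · simp [G, h]
    · simp [G, h, reduceA]
  | succ g ih =>
    intro b hb
    rw [reduceA_succ mcs p hp (g+1) b hb]
    congr 1
    apply List.map_congr_left
    intro sm hsm
    obtain ⟨hs1, _⟩ := splitB_pos p b hp hb sm hsm
    by_cases h : sm.1 ≤ mcs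
    · simp [G, h]
    · rw [ih sm.1 hs1]
      simp [G, h]

lemma sum_map_replace (k v δ : Int) (w : Int → Int) :
    ∀ l : List (Int × Int), (l.map Prod.fst).Nodup → (k, v) ∈ l →
    ((l.map (fun q => if q.1 == k then (k, v + δ) else q)).map (fun sm => sm.2 * w sm.1)).sum
    = ((l.map (fun sm => sm.2 * w sm.1)).sum) + δ * w k := by
  intro l
  induction l with
  | nil => intro _ h; simp at h
  | cons hd tl ih =>
    intro hnd hm
    simp only [List.map_cons, List.sum_cons] at *
    have hnd1 : hd.1 ∉ tl.map Prod.fst := (List.nodup_cons.1 hnd).1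
    have hnd2 : (tl.map Prod.fst).Nodup := (List.nodup_cons.1 hnd).2
    by_cases hk : hd.1 = k
    · have hhd : hd = (k, v) := by
        rcases List.mem_cons.1 hm with h | h
        · exact h.symm
        · exact absurd (hk ▸ List.mem_map.2 ⟨(k, v), h, rfl⟩) hnd1
      subst hhd
      simp only [beq_self_eq_true, if_pos]
      have htl : (tl.map (fun q => if q.1 == k then (k, v + δ) else q)) = tl := by
        conv_rhs => rw [← List.map_id tl]
        apply List.map_congr_left
        intro q hq
        have hqk : q.1 ≠ k := by
          intro he
          exact hnd1 (he ▸ List.mem_map.2 ⟨q, hq, rfl⟩)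
        simp [hqk]
      rw [htl]
      ring
    · have hne : (hd.1 == k) = false := by simp [hk]
      simp only [hne, Bool.false_eq_true, if_false]
      have hm2 : (k, v) ∈ tl := by
        rcases List.mem_cons.1 hm with h | h
        · exact absurd (congrArg Prod.fst h.symm) hk
        · exact h
      rw [ih hnd2 hm2]
      ring

lemma sum_items_insert_add (d : PySem.Dict Int Int) (hnd : d.keys.Nodup) (k δ : Int) (w : Int → Int) :
    (((d.insert k (d.getD k 0 + δ)).items).map (fun sm => sm.2 * w sm.1)).sum
    = ((d.items.map (fun sm => sm.2 * w sm.1)).sum) + δ * w k := by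
  by_cases hc : d.contains k
  · obtain ⟨v, hv⟩ : ∃ v, d.get? k = some v := by
      rw [PySem.Dict.contains_eq_isSome_get?] at hc
      exact Option.isSome_iff_exists.1 hc
    have hgd : d.getD k 0 = v := PySem.Dict.getD_of_get?_eq_some d 0 hv
    have hmem : (k, v) ∈ d.items := (PySem.Dict.get?_eq_some_iff_mem_items d k v hnd).1 hv
    rw [hgd, PySem.Dict.items_insert_of_contains d _ hc]
    exact sum_map_replace k v δ w d.items hnd hmem
  · rw [PySem.Dict.items_insert_of_not_contains d _ (by simpa using hc),
        PySem.Dict.getD_of_not_contains d 0 (by simpa using hc)]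
    simp

lemma nodup_keys_foldl_acc (g : Int × Int → Int) (l : List (Int × Int)) (d : PySem.Dict Int Int)
    (hnd : d.keys.Nodup) :
    (l.foldl (fun d sm => d.insert sm.1 (d.getD sm.1 0 + g sm)) d).keys.Nodup := by
  exact PySem.Dict.nodup_keys_foldl_insert_key l Prod.fst (fun d sm => d.getD sm.1 0 + g sm) d hnd

lemma sum_items_foldl (g : Int × Int → Int) (w : Int → Int) :
    ∀ (l : List (Int × Int)) (d : PySem.Dict Int Int), d.keys.Nodup →
    (((l.foldl (fun d sm => d.insert sm.1 (d.getD sm.1 0 + g sm)) d).items).map (fun sm => sm.2 * w sm.1)).sum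
    = (d.items.map (fun sm => sm.2 * w sm.1)).sum + (l.map (fun sm => g sm * w sm.1)).sum := by
  intro l
  induction l with
  | nil => intro d hnd; simp
  | cons hd tl ih =>
    intro d hnd
    simp only [List.foldl_cons, List.map_cons, List.sum_cons]
    rw [ih (d.insert hd.1 (d.getD hd.1 0 + g hd))
        (PySem.Dict.nodup_keys_insert d hd.1 _ hnd)]
    rw [sum_items_insert_add d hnd hd.1 (g hd) w]
    ring

lemma foldl_stepB (mcs p : Int) (f : Nat) :
    ∀ (l : List (Int × Int)) (t : Int) (d : PySem.Dict Int Int), d.keys.Nodup →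
    (l.foldl (stepB mcs p) (t, d)).2.keys.Nodup ∧
    (l.foldl (stepB mcs p) (t, d)).1
      + (((l.foldl (stepB mcs p) (t, d)).2.items).map (fun sm => sm.2 * G mcs p f sm.1)).sum
    = t + (d.items.map (fun sm => sm.2 * G mcs p f sm.1)).sum
      + (l.map (fun sm => sm.2 * G mcs p (f+1) sm.1)).sum := by
  intro l
  induction l with
  | nil => intro t d hnd; exact ⟨hnd, by simp⟩
  | cons hd tl ih =>
    intro t d hnd
    simp only [List.foldl_cons, List.map_cons, List.sum_cons]
    by_cases h : hd.1 ≤ mcs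
    · rw [show stepB mcs p (t, d) hd = (t + hd.2, d) from by simp [stepB, h]]
      obtain ⟨h1, h2⟩ := ih (t + hd.2) d hnd
      refine ⟨h1, ?_⟩
      rw [h2, show G mcs p (f+1) hd.1 = 1 from by rw [G, if_pos h]]
      ring
    · rw [show stepB mcs p (t, d) hd
          = (t, (splitB p hd.1).foldl (fun d s2 => d.insert s2.1 (d.getD s2.1 0 + hd.2 * s2.2)) d)
          from by simp [stepB, h]]
      obtain ⟨h1, h2⟩ := ih t _ (nodup_keys_foldl_acc (fun s2 => hd.2 * s2.2) (splitB p hd.1) d hnd)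
      refine ⟨h1, ?_⟩
      rw [h2, sum_items_foldl (fun s2 => hd.2 * s2.2) (G mcs p f) (splitB p hd.1) d hnd]
      rw [show G mcs p (f+1) hd.1 = ((splitB p hd.1).map (fun sm => sm.2 * G mcs p f sm.1)).sum
          from by rw [G, if_neg h]]
      rw [show ((splitB p hd.1).map (fun sm => hd.2 * sm.2 * G mcs p f sm.1)).sum
          = hd.2 * ((splitB p hd.1).map (fun sm => sm.2 * G mcs p f sm.1)).sum from by
        rw [← List.sum_map_mul_left]; congr 1; apply List.map_congr_left; intro sm _; ring]
      ring

lemma loopB_eq (mcs p : Int) : ∀ (f : Nat) (total : Int) (level : PySem.Dict Int Int),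
    level.keys.Nodup →
    loopB mcs p f total level = total + (level.items.map (fun sm => sm.2 * G mcs p f sm.1)).sum := by
  intro f
  induction f with
  | zero => intro total level _; simp [loopB, G]
  | succ f ih =>
    intro total level hnd
    rw [loopB]
    by_cases hemp : level.items.isEmpty
    · rw [if_pos hemp]
      rw [List.isEmpty_iff.1 hemp]
      simp
    · rw [if_neg hemp]
      obtain ⟨h1, h2⟩ := foldl_stepB mcs p f level.items total PySem.Dict.empty
        PySem.Dict.nodup_keys_empty
      rw [ih _ _ h1, h2]
      simp [PySem.Dict.empty]


lemma count_piles_eq_alt (b mcs p : Int) (hpre : Pre_count_piles b mcs p) :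
    count_piles b mcs p = count_piles_alt b mcs p := by
  unfold Pre_count_piles at hpre
  by_cases hb : b ≤ 0
  · -- boxes_count ≤ 0: both sides are 0
    have hsplit : splitB p b = [] := by
      rw [splitB, if_pos (by omega : min b p ≤ 0)]
    have htn : b.toNat = 0 := by omega
    have hmp : (min b p).toNat = 0 := by omega
    rw [count_piles, count_piles_alt, htn, reduceA, hmp]
    simp only [List.range_zero, List.map_nil, List.sum_nil, sub_zero]
    rw [show PySem.List.pyRange 0 b = [] from by simp [PySem.List.pyRange, hb]]
    simp only [List.foldl_nil]
    rw [hsplit]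
    simp only [List.foldl_nil]
    rw [loopB]
    simp [PySem.Dict.empty]
  · -- 1 ≤ b, 1 ≤ p
    have hb1 : 1 ≤ b := by omega
    have hp : 1 ≤ p := by omega
    rw [count_piles, count_piles_alt]
    rw [reduceA_eq_Gsum mcs p hp b.toNat b hb1]
    rw [loopB_eq mcs p (b.toNat + 1) 0
      _ (nodup_keys_foldl_acc (fun sm => sm.2) (splitB p b) PySem.Dict.empty PySem.Dict.nodup_keys_empty)]
    rw [sum_items_foldl (fun sm => sm.2) (G mcs p (b.toNat + 1)) (splitB p b) PySem.Dict.empty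
      PySem.Dict.nodup_keys_empty]
    simp [PySem.Dict.empty]

-- ===== VERDICT (by name: the statement is the Claim_ definition above) =====
theorem count_piles_spec : Claim_equal_count_piles := by
  intro boxes_count max_carry_size parts _ hpre
  unfold Spec_count_piles
  exact count_piles_eq_alt boxes_count max_carry_size parts hpre
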